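-- pv_equiv track=rewrite | github.com/sankoudai/toxic-comment | featurizer.py | get_char_group
-- ===== SOURCE A (Python) =====
-- sletters = ['a', 'e', 'i', 'o', 'u', 'y']
--
-- def get_char_group(word):
--     if not word:
--         return ''
--
--     if len(word)<=3:
--         return word
--
--     grp = ''
--     #添加所有相连元音
--     for i, ch in enumerate(word):
--         if ch in sletters:
--             grp += ch
--         else:
--             break
--     if len(grp) == len(word):
--         return grp
--
--     # 添加所有相连辅音，如word=blast,  grp=bl
--     starti = len(grp)
--     for i in range(starti, len(word)):
--         ch = word[i]
--         if ch not in sletters: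
--             grp += ch
--         else:
--             break
--     if len(grp) == len(word):
--         return grp
--
--     #添加所有元音，如word=blast, grp=bla
--     starti = len(grp)
--     for i in range(starti, len(word)):
--         ch = word[i]
--         if ch in sletters:
--             grp += ch
--         else:
--             break
--     if len(grp) == len(word):
--         return grp
--
--     #添加所有相连辅音(除了最后一个)
--     starti = len(grp)
--     for i in range(starti, len(word)):
--         ch = word[i]
--         if ch not in sletters:
--             grp += ch
--         else:
--             break
--     if len(grp) == len(word):
--         return grp
--     return grp[:-1]
-- ===== SOURCE B (Python) =====
-- sletters = ['a', 'e', 'i', 'o', 'u', 'y']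
--
-- def get_char_group(word):
--     if not word:
--         return ''
--     if len(word) <= 3:
--         return word
--     # run-length encode the vowel/consonant classification of the word
--     runs = []
--     for ch in word:
--         v = ch in sletters
--         if runs and runs[-1][0] == v:
--             runs[-1][1] += 1
--         else:
--             runs.append([v, 1])
--     # consume runs along the target polarity pattern, skipping unmatched targets
--     n = 0
--     i = 0
--     for target in (True, False, True, False):
--         if i < len(runs) and runs[i][0] == target:
--             n += runs[i][1]
--             i += 1
--     prefix = ''.join(word[j] for j in range(n))
--     return prefix if n == len(word) else prefix[:-1]
-- ===== Notes on version B (the rewrite author's own statement) =====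
-- stated objective: simpler
-- what changed: Replaces A's four sequential greedy scan loops (vowels, consonants, vowels, consonants, each with its own early-return length check) with one run-length encoding of the word's vowel/consonant classification followed by a single selection pass over the fixed target polarity pattern [True, False, True, False], then one final full/partial-prefix decision.
import Mathlib
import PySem

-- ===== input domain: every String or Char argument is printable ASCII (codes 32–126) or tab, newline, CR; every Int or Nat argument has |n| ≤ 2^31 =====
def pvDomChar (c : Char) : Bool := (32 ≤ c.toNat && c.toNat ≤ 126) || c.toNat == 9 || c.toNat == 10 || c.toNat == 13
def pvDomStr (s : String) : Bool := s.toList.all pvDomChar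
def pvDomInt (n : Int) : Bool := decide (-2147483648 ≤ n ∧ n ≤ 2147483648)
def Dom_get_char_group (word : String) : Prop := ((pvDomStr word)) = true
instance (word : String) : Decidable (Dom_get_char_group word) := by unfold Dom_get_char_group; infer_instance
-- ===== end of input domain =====

-- B re-implements A's four sequential greedy scans as a single run-length encoding plus one
-- selection pass over the target polarity pattern (objective: simpler decomposition, same cost).

-- shared constant: the Python module-level `sletters`
def pySletters : List Char := ['a', 'e', 'i', 'o', 'u', 'y']
def isS (c : Char) : Bool := pySletters.contains c

-- ===== PORT A =====
-- one `for` loop of A: append chars whose class (`ch in sletters`) equals p, break otherwise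
def phaseA (p : Bool) : List Char → List Char → List Char
  | [], grp => grp
  | c :: rest, grp => if isS c == p then phaseA p rest (grp ++ [c]) else grp

def get_char_group (word : String) : String :=
  let cs := word.toList
  if cs = [] then ""
  else if cs.length ≤ 3 then word
  else
    let g1 := phaseA true cs []
    if g1.length = cs.length then String.mk g1
    else
      let g2 := phaseA false (cs.drop g1.length) g1
      if g2.length = cs.length then String.mk g2
      else
        let g3 := phaseA true (cs.drop g2.length) g2
        if g3.length = cs.length then String.mk g3
        else
          let g4 := phaseA false (cs.drop g3.length) g3
          if g4.length = cs.length then String.mk g4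
          else String.mk g4.dropLast  -- grp[:-1]: exact (dropLast = Python [:-1] on any list)

-- ===== PORT B =====
-- Source B's run-building loop: `cur` is the run currently being extended (python's runs[-1])
def buildRuns : List Char → Bool × Nat → List (Bool × Nat)
  | [], cur => [cur]
  | c :: rest, cur =>
      if isS c == cur.1 then buildRuns rest (cur.1, cur.2 + 1)
      else cur :: buildRuns rest (isS c, 1)

def runsOf : List Char → List (Bool × Nat)
  | [] => []
  | c :: rest => buildRuns rest (isS c, 1)

-- Source B's selection loop over the target pattern, pointer into runs = the list argument
def selectRuns : List (Bool × Nat) → List Bool → Nat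
  | _, [] => 0
  | [], _ :: ts => selectRuns [] ts
  | (b, n) :: rs, t :: ts => if b == t then n + selectRuns rs ts else selectRuns ((b, n) :: rs) ts
  termination_by rs ts => ts.length

def get_char_group_alt (word : String) : String :=
  let cs := word.toList
  if cs = [] then ""
  else if cs.length ≤ 3 then word
  else
    let n := selectRuns (runsOf cs) [true, false, true, false]
    let pre := cs.take n   -- ''.join(word[j] for j in range(n))
    if n = cs.length then String.mk pre else String.mk pre.dropLast

-- ===== PRECONDITION & SPEC =====
def Spec_get_char_group (word : String) (out : String) : Prop := out = get_char_group_alt word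
instance (word : String) (out : String) : Decidable (Spec_get_char_group word out) := by unfold Spec_get_char_group; infer_instance

-- ===== CLAIM (what is proved, stated in full; the proofs are below) =====
def Claim_equal_get_char_group : Prop := ∀ (word : String), Dom_get_char_group word → Spec_get_char_group word (get_char_group word)

-- ===== LEMMAS AND PROOFS =====
def qcl (p : Bool) (c : Char) : Bool := isS c == p

lemma phaseA_eq (p : Bool) : ∀ (cs g : List Char), phaseA p cs g = g ++ cs.takeWhile (qcl p) := by
  intro cs
  induction cs with
  | nil => intro g; simp [phaseA]
  | cons c rest ih =>
      intro g
      by_cases h : isS c == p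
      · simp [phaseA, List.takeWhile_cons, qcl, h, ih]
      · simp [phaseA, List.takeWhile_cons, qcl, h]

lemma take_tw (p : Bool) (cs : List Char) :
    cs.take ((cs.takeWhile (qcl p)).length) = cs.takeWhile (qcl p) :=
  ((List.prefix_iff_eq_take).1 (List.takeWhile_prefix _)).symm

def consumeSeq : List Bool → List Char → Nat
  | [], _ => 0
  | t :: ts, cs =>
      (cs.takeWhile (qcl t)).length + consumeSeq ts (cs.drop (cs.takeWhile (qcl t)).length)

lemma consumeSeq_nil (ts : List Bool) : consumeSeq ts [] = 0 := by
  induction ts with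
  | nil => rfl
  | cons t ts ih => simp [consumeSeq, ih]

lemma buildRuns_eq : ∀ (cs : List Char) (v : Bool) (n : Nat),
    buildRuns cs (v, n)
      = (v, n + (cs.takeWhile (qcl v)).length)
        :: runsOf (cs.drop (cs.takeWhile (qcl v)).length) := by
  intro cs
  induction cs with
  | nil => intro v n; simp [buildRuns, runsOf]
  | cons c rest ih =>
      intro v n
      by_cases h : isS c == v
      · have := ih v (n + 1)
        simp [buildRuns, h, List.takeWhile_cons, qcl, this]
        omega
      · simp [buildRuns, h, List.takeWhile_cons, qcl, runsOf]

lemma runsOf_cons (c : Char) (rest : List Char) :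
    runsOf (c :: rest)
      = (isS c, ((c :: rest).takeWhile (qcl (isS c))).length)
        :: runsOf ((c :: rest).drop ((c :: rest).takeWhile (qcl (isS c))).length) := by
  have h : qcl (isS c) c = true := by simp [qcl]
  rw [show runsOf (c :: rest) = buildRuns rest (isS c, 1) from rfl, buildRuns_eq]
  simp [List.takeWhile_cons, h, Nat.add_comm]

lemma selectRuns_ts_nil (rs : List (Bool × Nat)) : selectRuns rs [] = 0 := by
  cases rs with
  | nil => simp [selectRuns]
  | cons r rs => cases r; simp [selectRuns]

lemma selectRuns_rs_nil (ts : List Bool) : selectRuns [] ts = 0 := by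
  induction ts with
  | nil => simp [selectRuns]
  | cons t ts ih => simp [selectRuns, ih]

lemma select_eq : ∀ (ts : List Bool) (cs : List Char),
    selectRuns (runsOf cs) ts = consumeSeq ts cs := by
  intro ts
  induction ts with
  | nil => intro cs; rw [selectRuns_ts_nil]; rfl
  | cons t ts ih =>
      intro cs
      cases cs with
      | nil =>
          show selectRuns [] (t :: ts) = consumeSeq (t :: ts) []
          rw [selectRuns_rs_nil]
          simp [consumeSeq, consumeSeq_nil]
      | cons c rest =>
          rw [runsOf_cons]
          by_cases h : isS c = t
          · subst h
            simp only [selectRuns, beq_self_eq_true, if_true]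
            rw [ih]
            rfl
          · have htw : (c :: rest).takeWhile (qcl t) = [] := by
              simp [List.takeWhile_cons, qcl, h]
            simp only [selectRuns]
            rw [if_neg (by simpa using h), ← runsOf_cons, ih]
            simp [consumeSeq, htw]

-- the post-guard bodies of the two ports agree, expressed over the char list
lemma cascade_eq (cs : List Char) :
    (let g1 := phaseA true cs []
     if g1.length = cs.length then String.mk g1
     else
       let g2 := phaseA false (cs.drop g1.length) g1
       if g2.length = cs.length then String.mk g2
       else
         let g3 := phaseA true (cs.drop g2.length) g2
         if g3.length = cs.length then String.mk g3
         else
           let g4 := phaseA false (cs.drop g3.length) g3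
           if g4.length = cs.length then String.mk g4
           else String.mk g4.dropLast)
    = (let n := consumeSeq [true, false, true, false] cs
       if n = cs.length then String.mk (cs.take n) else String.mk (cs.take n).dropLast) := by
  simp only [phaseA_eq, List.nil_append]
  set k1 := (cs.takeWhile (qcl true)).length with hk1
  set c2 := cs.drop k1 with hc2
  set k2 := (c2.takeWhile (qcl false)).length with hk2
  set c3 := c2.drop k2 with hc3
  set k3 := (c3.takeWhile (qcl true)).length with hk3
  set c4 := c3.drop k3 with hc4
  set k4 := (c4.takeWhile (qcl false)).length with hk4
  have hcons : consumeSeq [true, false, true, false] cs = k1 + (k2 + (k3 + (k4 + 0))) := rfl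
  have ht1 : cs.take k1 = cs.takeWhile (qcl true) := by
    rw [hk1]; exact take_tw true cs
  have hdrop2 : cs.drop (k1 + k2) = c3 := by rw [← List.drop_drop, ← hc2, ← hc3]
  have hdrop3 : cs.drop (k1 + k2 + k3) = c4 := by rw [← List.drop_drop, hdrop2, ← hc4]
  have ht2 : cs.take (k1 + k2) = cs.takeWhile (qcl true) ++ c2.takeWhile (qcl false) := by
    rw [List.take_add, ht1, ← hc2, hk2, take_tw]
  have ht3 : cs.take (k1 + k2 + k3)
      = cs.takeWhile (qcl true) ++ c2.takeWhile (qcl false) ++ c3.takeWhile (qcl true) := by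
    rw [List.take_add, ht2, hdrop2, hk3, take_tw]
  have ht4 : cs.take (k1 + k2 + k3 + k4)
      = cs.takeWhile (qcl true) ++ c2.takeWhile (qcl false) ++ c3.takeWhile (qcl true)
        ++ c4.takeWhile (qcl false) := by
    rw [List.take_add, ht3, hdrop3, hk4, take_tw]
  rw [hcons]
  simp only [List.length_append, ← hk1, ← hk2, ← hk3, ← hk4, ← hc2, hdrop2, hdrop3]
  by_cases e1 : k1 = cs.length
  · have h2 : c2 = [] := by rw [hc2, e1, List.drop_length]
    have z2 : k2 = 0 := by rw [hk2, h2]; rfl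
    have h3 : c3 = [] := by rw [hc3, h2]; simp
    have z3 : k3 = 0 := by rw [hk3, h3]; rfl
    have h4 : c4 = [] := by rw [hc4, h3]; simp
    have z4 : k4 = 0 := by rw [hk4, h4]; rfl
    have hn : k1 + (k2 + (k3 + (k4 + 0))) = k1 := by omega
    rw [if_pos e1, hn, if_pos e1, ht1]
  · rw [if_neg e1]
    by_cases e2 : k1 + k2 = cs.length
    · have h3 : c3 = [] := by rw [← hdrop2, e2, List.drop_length]
      have z3 : k3 = 0 := by rw [hk3, h3]; rfl
      have h4 : c4 = [] := by rw [hc4, h3]; simp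
      have z4 : k4 = 0 := by rw [hk4, h4]; rfl
      have hn : k1 + (k2 + (k3 + (k4 + 0))) = k1 + k2 := by omega
      rw [if_pos e2, hn, if_pos e2, ht2]
    · rw [if_neg e2]
      by_cases e3 : k1 + k2 + k3 = cs.length
      · have h4 : c4 = [] := by rw [← hdrop3, e3, List.drop_length]
        have z4 : k4 = 0 := by rw [hk4, h4]; rfl
        have hn : k1 + (k2 + (k3 + (k4 + 0))) = k1 + k2 + k3 := by omega
        rw [if_pos e3, hn, if_pos e3, ht3]
      · rw [if_neg e3]
        have hn : k1 + (k2 + (k3 + (k4 + 0))) = k1 + k2 + k3 + k4 := by omega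
        rw [hn]
        by_cases e4 : k1 + k2 + k3 + k4 = cs.length
        · rw [if_pos e4, if_pos e4, ht4]
        · rw [if_neg e4, if_neg e4, ht4]

-- ===== VERDICT (by name: the statement is the Claim_ definition above) =====
theorem get_char_group_spec : Claim_equal_get_char_group := by
  intro word _
  unfold Spec_get_char_group get_char_group get_char_group_alt
  set cs := word.toList with hcs
  by_cases h0 : cs = []
  · simp [h0]
  by_cases h3 : cs.length ≤ 3
  · simp [h0, h3]
  simp only [if_neg h0, if_neg h3]
  rw [select_eq]
  exact cascade_eq cs
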